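-- pv_equiv track=rewrite | github.com/raihala/advent-of-code | 2018/day5.py | collapse_polymer
-- ===== SOURCE A (Python) =====
-- def collapse_polymer(polymer):
--     polymer_list = list(polymer)
--     while True:
--         start_len = len(polymer_list)
--         for i in range(start_len-1):
--             if (polymer_list[i].upper() == polymer_list[i + 1].upper() and
--                     (polymer_list[i].isupper() and polymer_list[i + 1].islower() or
--                      polymer_list[i].islower() and polymer_list[i + 1].isupper())
--             ):
--                 del polymer_list[i:i + 2]
--                 break
--         end_len = len(polymer_list)
--         if start_len == end_len:
--             break
--     return ''.join(polymer_list)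
-- ===== SOURCE B (Python) =====
-- def collapse_polymer(polymer):
--     stack = []
--     for c in polymer:
--         if stack and stack[-1] != c and stack[-1].upper() == c.upper():
--             stack.pop()
--         else:
--             stack.append(c)
--     return ''.join(stack)
-- ===== Notes on version B (the rewrite author's own statement) =====
-- stated objective: simpler
-- what changed: Replaced the restart-scan-and-delete loop (rescan from the start after every removed pair) with a single left-to-right pass maintaining a stack that pops when the top is the opposite-case partner of the current character.
import Mathlib
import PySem

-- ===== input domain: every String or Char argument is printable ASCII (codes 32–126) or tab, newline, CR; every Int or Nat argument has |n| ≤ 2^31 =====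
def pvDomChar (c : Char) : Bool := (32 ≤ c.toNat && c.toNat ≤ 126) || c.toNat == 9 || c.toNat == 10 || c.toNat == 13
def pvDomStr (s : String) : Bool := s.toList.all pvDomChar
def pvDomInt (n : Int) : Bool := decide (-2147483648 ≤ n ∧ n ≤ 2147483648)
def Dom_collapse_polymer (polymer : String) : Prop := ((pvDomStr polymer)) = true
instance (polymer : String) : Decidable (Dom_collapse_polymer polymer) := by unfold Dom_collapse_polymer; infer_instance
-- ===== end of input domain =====

-- B replaces A's rescan-after-each-deletion loop by a single left-to-right stack pass (simpler one-pass algorithm).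

-- ===== PORT A =====
-- A's reaction test: same letter ignoring case (single-char .upper() comparison), opposite cases.
def pyReact (a b : Char) : Bool :=
  (PySem.Chars.upperChar a == PySem.Chars.upperChar b) &&
  ((PySem.Chars.isupper a && PySem.Chars.islower b) ||
   (PySem.Chars.islower a && PySem.Chars.isupper b))

-- A's inner for-loop: scan left to right, delete the FIRST reacting adjacent pair (del l[i:i+2]; break).
def findDel : List Char → Option (List Char)
  | a :: b :: rest => if pyReact a b then some rest else (findDel (b :: rest)).map (a :: ·)
  | _ => none

theorem findDel_length : ∀ (l l' : List Char), findDel l = some l' → l'.length + 2 = l.length := by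
  intro l
  induction l with
  | nil => intro l' h; simp [findDel] at h
  | cons a t ih =>
    intro l' h
    cases t with
    | nil => simp [findDel] at h
    | cons b rest =>
      simp only [findDel] at h
      split at h
      · cases h; simp
      · simp only [Option.map_eq_some_iff] at h
        obtain ⟨m, hm, rfl⟩ := h
        have := ih m hm
        simp at this ⊢
        omega

-- A's while-True loop: repeat until a full scan deletes nothing (start_len == end_len).
def collapseLoop (l : List Char) : List Char :=
  match h : findDel l with
  | some l' => collapseLoop l'
  | none => l
termination_by l.length
decreasing_by have := findDel_length l _ h; omega

def collapse_polymer (polymer : String) : String :=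
  String.mk (collapseLoop polymer.toList)

-- ===== PORT B =====
-- B's reaction test: stack[-1] != c and stack[-1].upper() == c.upper()
def reactsAlt (a b : Char) : Bool :=
  (a != b) && (PySem.Chars.upperChar a == PySem.Chars.upperChar b)

-- one step of B's loop; the stack is kept top-first (cons/uncons = Python's append/pop at the end)
def stackStep (s : List Char) (c : Char) : List Char :=
  match s with
  | t :: rest => if reactsAlt t c then rest else c :: t :: rest
  | [] => [c]

def collapse_polymer_alt (polymer : String) : String :=
  String.mk ((polymer.toList.foldl stackStep []).reverse)

-- ===== PRECONDITION & SPEC =====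
def Spec_collapse_polymer (polymer : String) (out : String) : Prop := out = collapse_polymer_alt polymer
instance (polymer : String) (out : String) : Decidable (Spec_collapse_polymer polymer out) := by unfold Spec_collapse_polymer; infer_instance

-- ===== CLAIM (what is proved, stated in full; the proofs are below) =====
def Claim_equal_collapse_polymer : Prop := ∀ (polymer : String), Dom_collapse_polymer polymer → Spec_collapse_polymer polymer (collapse_polymer polymer)

-- ===== LEMMAS AND PROOFS =====

theorem char_toNat_inj (c d : Char) : c = d ↔ c.toNat = d.toNat :=
  ⟨fun h => congrArg _ h, fun h => Char.ext (UInt32.toNat_inj.mp h)⟩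

theorem islower_iff (c : Char) : PySem.Chars.islower c = true ↔ 97 ≤ c.toNat ∧ c.toNat ≤ 122 := by
  simp [PySem.Chars.islower, Char.le_def, UInt32.le_iff_toNat_le]

theorem isupper_iff (c : Char) : PySem.Chars.isupper c = true ↔ 65 ≤ c.toNat ∧ c.toNat ≤ 90 := by
  simp [PySem.Chars.isupper, Char.le_def, UInt32.le_iff_toNat_le]

theorem upperChar_toNat (c : Char) :
    (PySem.Chars.upperChar c).toNat = if 97 ≤ c.toNat ∧ c.toNat ≤ 122 then c.toNat - 32 else c.toNat := by
  rw [PySem.Chars.upperChar]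
  by_cases h : PySem.Chars.islower c = true
  · have h' := (islower_iff c).mp h
    have hv : (c.toNat - 32).isValidChar := Or.inl (by omega)
    simp [h, h', Char.ofNat, hv]
  · have h' : ¬ (97 ≤ c.toNat ∧ c.toNat ≤ 122) := fun hx => h ((islower_iff c).mpr hx)
    simp [h, h']

theorem pyReact_iff (a b : Char) : pyReact a b = true ↔
    (if 97 ≤ a.toNat ∧ a.toNat ≤ 122 then a.toNat - 32 else a.toNat) =
    (if 97 ≤ b.toNat ∧ b.toNat ≤ 122 then b.toNat - 32 else b.toNat) ∧
    ((65 ≤ a.toNat ∧ a.toNat ≤ 90) ∧ (97 ≤ b.toNat ∧ b.toNat ≤ 122) ∨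
     (97 ≤ a.toNat ∧ a.toNat ≤ 122) ∧ (65 ≤ b.toNat ∧ b.toNat ≤ 90)) := by
  simp [pyReact, char_toNat_inj, upperChar_toNat, islower_iff, isupper_iff]

theorem reactsAlt_iff (a b : Char) : reactsAlt a b = true ↔
    a.toNat ≠ b.toNat ∧
    (if 97 ≤ a.toNat ∧ a.toNat ≤ 122 then a.toNat - 32 else a.toNat) =
    (if 97 ≤ b.toNat ∧ b.toNat ≤ 122 then b.toNat - 32 else b.toNat) := by
  simp [reactsAlt, char_toNat_inj, upperChar_toNat, bne_iff_ne]

-- the two reaction tests agree on every character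
theorem reactsAlt_eq (a b : Char) : reactsAlt a b = pyReact a b := by
  rw [Bool.eq_iff_iff, reactsAlt_iff, pyReact_iff]
  split_ifs <;> omega

-- if x reacts with a and a reacts with b then x = b (the opposite-case partner is unique)
theorem react_partner (x a b : Char) (h1 : pyReact x a = true) (h2 : pyReact a b = true) : x = b := by
  rw [pyReact_iff] at h1 h2
  rw [char_toNat_inj]
  rcases h1 with ⟨e1, c1⟩; rcases h2 with ⟨e2, c2⟩
  split_ifs at e1 e2 <;> omega

-- a stack whose adjacent entries never react (read top-first)
def StackOK : List Char → Prop
  | x :: y :: rest => pyReact y x = false ∧ StackOK (y :: rest)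
  | _ => True

theorem stackOK_tail (x : Char) (s : List Char) (h : StackOK (x :: s)) : StackOK s := by
  cases s with
  | nil => trivial
  | cons y r => exact h.2

theorem stackOK_step (s : List Char) (c : Char) (h : StackOK s) : StackOK (stackStep s c) := by
  cases s with
  | nil => trivial
  | cons t rest =>
    rw [stackStep]
    by_cases hr : reactsAlt t c = true
    · simp [hr]; exact stackOK_tail t rest h
    · simp [hr]
      refine ⟨?_, h⟩
      rw [← reactsAlt_eq]
      exact Bool.not_eq_true _ ▸ hr

theorem step_pair (s : List Char) (a b : Char) (hs : StackOK s) (h : pyReact a b = true) :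
    stackStep (stackStep s a) b = s := by
  cases s with
  | nil => simp [stackStep, reactsAlt_eq, h]
  | cons x t =>
    by_cases hx : pyReact x a = true
    · have hxb : x = b := react_partner x a b hx h
      rw [stackStep]
      simp [reactsAlt_eq, hx]
      cases t with
      | nil => simp [stackStep, hxb]
      | cons y u =>
        have hyx : pyReact y x = false := hs.1
        rw [stackStep]
        simp [reactsAlt_eq, hxb ▸ hyx, hxb]
    · rw [stackStep]
      simp [reactsAlt_eq, hx]
      rw [stackStep]
      simp [reactsAlt_eq, h]

theorem foldl_findDel : ∀ (l l' : List Char), findDel l = some l' → ∀ (s : List Char), StackOK s →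
    l.foldl stackStep s = l'.foldl stackStep s := by
  intro l
  induction l with
  | nil => intro l' h; simp [findDel] at h
  | cons a t ih =>
    intro l' h s hs
    cases t with
    | nil => simp [findDel] at h
    | cons b rest =>
      simp only [findDel] at h
      split at h
      · cases h
        simp only [List.foldl_cons]
        rw [step_pair s a b hs (by assumption)]
      · simp only [Option.map_eq_some_iff] at h
        obtain ⟨m, hm, rfl⟩ := h
        simp only [List.foldl_cons]
        exact ih m hm (stackStep s a) (stackOK_step s a hs)

-- the stack's top does not react with the next input character
def HeadOK : List Char → List Char → Prop
  | x :: _, h :: _ => pyReact x h = false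
  | _, _ => True

theorem foldl_noDel : ∀ (l : List Char), findDel l = none → ∀ (s : List Char), StackOK s →
    HeadOK s l → l.foldl stackStep s = l.reverse ++ s := by
  intro l
  induction l with
  | nil => intro _ s _ _; simp
  | cons h t ih =>
    intro hf s hs hh
    have hpush : stackStep s h = h :: s := by
      cases s with
      | nil => rfl
      | cons x r =>
        have : pyReact x h = false := hh
        simp [stackStep, reactsAlt_eq, this]
    have hsOK : StackOK (h :: s) := by
      cases s with
      | nil => trivial
      | cons x r => exact ⟨hh, hs⟩
    cases t with
    | nil => simp [hpush]
    | cons b rest =>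
      simp only [findDel] at hf
      split at hf
      · cases hf
      · have hhb : pyReact h b = false := by
          rename_i hcond
          exact Bool.not_eq_true _ ▸ hcond
        simp only [Option.map_eq_none_iff] at hf
        have := ih hf (h :: s) hsOK (by exact hhb)
        simp only [List.foldl_cons] at this ⊢
        rw [hpush, this]
        simp

theorem collapseLoop_eq (l : List Char) : collapseLoop l = (l.foldl stackStep []).reverse := by
  fun_induction collapseLoop l with
  | case1 l l' hf ih =>
    rw [ih, foldl_findDel l l' hf [] trivial]
  | case2 l hf =>
    rw [foldl_noDel l hf [] trivial trivial]
    simp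

-- ===== VERDICT (by name: the statement is the Claim_ definition above) =====
theorem collapse_polymer_spec : Claim_equal_collapse_polymer := by
  intro polymer _
  unfold Spec_collapse_polymer collapse_polymer collapse_polymer_alt
  rw [collapseLoop_eq]
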